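-- pv_equiv track=rewrite | github.com/matthewtoholland/malt | malt/classes.py | sort_elements
-- ===== SOURCE A (Python) =====
-- def sort_elements(element_dict):
--     """
--     Sorts a dictionary of elements into TRIPOS format - increasing
--     atomic number with H at the end
--     :param element_dict: dictionary keys = elements,
--     values = atomic numbers - values can be discarded
--     :return: list sorted into Tripos format
--     """
--     element_dict = dict((sorted(element_dict.items(),
--                                 key=lambda item: item[1])))
--     elements = [key for key in element_dict]
--
--     if 'H' in elements:
--         elements.remove('H')
--         elements.append('H')
--
--     return elements
-- ===== SOURCE B (Python) =====
-- def sort_elements(element_dict):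
--     """
--     Sorts a dictionary of elements into TRIPOS format - increasing
--     atomic number with H at the end
--     """
--     ordered = sorted(element_dict.items(), key=lambda item: (item[0] == 'H', item[1]))
--     return [key for key, _ in ordered]
-- ===== Notes on version B (the rewrite author's own statement) =====
-- stated objective: idiomatic
-- what changed: Replaces the sort-then-rebuild-dict-then-remove/append-H pipeline by one stable sort on the composite key (key == 'H', atomic number), which pushes H to the end directly; the dict round-trip and the if/remove/append branch disappear.
import Mathlib
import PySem

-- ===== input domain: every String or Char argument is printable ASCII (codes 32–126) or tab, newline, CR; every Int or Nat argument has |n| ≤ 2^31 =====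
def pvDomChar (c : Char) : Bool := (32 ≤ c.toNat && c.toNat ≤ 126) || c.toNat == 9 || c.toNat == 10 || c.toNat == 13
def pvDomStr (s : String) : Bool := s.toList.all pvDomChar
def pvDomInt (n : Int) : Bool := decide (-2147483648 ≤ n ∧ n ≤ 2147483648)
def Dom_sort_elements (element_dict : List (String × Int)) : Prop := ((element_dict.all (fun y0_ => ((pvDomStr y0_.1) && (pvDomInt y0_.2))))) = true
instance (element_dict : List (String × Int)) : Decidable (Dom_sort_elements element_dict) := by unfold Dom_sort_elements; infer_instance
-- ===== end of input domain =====

-- B replaces A's sort-then-rebuild-dict-then-remove/append-H pipeline by one stable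
-- sort on the composite key (key == 'H', atomic number); idiomatic, same cost.

-- ===== PORT A =====
def sort_elements (element_dict : List (String × Int)) : List String :=
  -- element_dict = dict(sorted(element_dict.items(), key=lambda item: item[1]))
  let d : PySem.Dict String Int :=
    (PySem.List.sorted element_dict (fun item => item.2)).foldl
      (fun acc kv => acc.insert kv.1 kv.2) (PySem.Dict.mk [])
  -- elements = [key for key in element_dict]
  let elements := d.keys
  -- if 'H' in elements: elements.remove('H'); elements.append('H')
  if "H" ∈ elements then
    match PySem.List.remove? elements "H" with
    | some l => l ++ ["H"]
    | none => elements
  else elements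

-- ===== PORT B =====
def sort_elements_alt (element_dict : List (String × Int)) : List String :=
  -- ordered = sorted(element_dict.items(), key=lambda item: (item[0] == 'H', item[1]))
  let ordered := PySem.List.sorted2 element_dict (fun item => item.1 == "H") (fun item => item.2)
  -- return [key for key, _ in ordered]
  ordered.map (fun kv => kv.1)

-- ===== PRECONDITION & SPEC =====
-- Pre_ excludes association lists with duplicate keys: they do not correspond to any
-- Python dict argument (a dict's keys are unique), so behaviour there is an artefact
-- of the assoc-list representation, not of either Python program.
def Pre_sort_elements (element_dict : List (String × Int)) : Prop :=
  (element_dict.map Prod.fst).Nodup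
instance (element_dict : List (String × Int)) : Decidable (Pre_sort_elements element_dict) := by
  unfold Pre_sort_elements; infer_instance

def pvWitness_sort_elements : (List (String × Int)) := [("C", 6), ("H", 1), ("O", 8)]

def Spec_sort_elements (element_dict : List (String × Int)) (out : List String) : Prop := out = sort_elements_alt element_dict
instance (element_dict : List (String × Int)) (out : List String) : Decidable (Spec_sort_elements element_dict out) := by unfold Spec_sort_elements; infer_instance

-- ===== CLAIM (what is proved, stated in full; the proofs are below) =====
def Claim_equal_sort_elements : Prop := ∀ (element_dict : List (String × Int)), Dom_sort_elements element_dict → Pre_sort_elements element_dict → Spec_sort_elements element_dict (sort_elements element_dict)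

-- ===== LEMMAS AND PROOFS =====

-- insertBy only looks at `before x ·` on the members of the list.
theorem insertBy_congr {α : Type} (bf bf' : α → α → Bool) (x : α) (ys : List α)
    (h : ∀ y ∈ ys, bf x y = bf' x y) :
    PySem.List.insertBy bf x ys = PySem.List.insertBy bf' x ys := by
  induction ys with
  | nil => rfl
  | cons y ys ih =>
    simp only [PySem.List.insertBy, h y (by simp)]
    split <;> simp_all

theorem insertBy_of_forall_before {α : Type} (bf : α → α → Bool) (x : α) (ys : List α)
    (h : ∀ y ∈ ys, bf x y = true) :
    PySem.List.insertBy bf x ys = x :: ys := by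
  cases ys with
  | nil => rfl
  | cons y ys => simp [PySem.List.insertBy, h y (by simp)]

theorem insertBy_append_of_forall_not {α : Type} (bf : α → α → Bool) (x : α) (A B : List α)
    (h : ∀ y ∈ A, bf x y = false) :
    PySem.List.insertBy bf x (A ++ B) = A ++ PySem.List.insertBy bf x B := by
  induction A with
  | nil => rfl
  | cons a A ih =>
    simp only [List.cons_append, PySem.List.insertBy, h a (by simp)]
    simp only [Bool.false_eq_true, if_false]
    rw [ih (fun y hy => h y (by simp [hy]))]

theorem insertBy_append_barrier {α : Type} (bf : α → α → Bool) (x : α) (A B : List α)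
    (h : ∀ y ∈ B, bf x y = true) :
    PySem.List.insertBy bf x (A ++ B) = PySem.List.insertBy bf x A ++ B := by
  induction A with
  | nil => simp [PySem.List.insertBy, insertBy_of_forall_before bf x B h]
  | cons a A ih =>
    simp only [List.cons_append, PySem.List.insertBy]
    split <;> simp [ih]

-- appending one element to the input of the stable sort
theorem sorted_concat {α : Type} (key : α → Int) (l : List α) (x : α) :
    PySem.List.sorted (l ++ [x]) key =
      PySem.List.insertBy (fun a b => decide (key a < key b)) x (PySem.List.sorted l key) := by
  rw [PySem.List.sorted_eq_foldl_insertBy, PySem.List.sorted_eq_foldl_insertBy, List.foldl_append]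
  rfl

theorem sorted2_concat (l : List (String × Int)) (x : String × Int) :
    PySem.List.sorted2 (l ++ [x]) (fun p => p.1 == "H") (fun p => p.2) =
      PySem.List.insertBy
        (fun a b => decide ((a.1 == "H") < (b.1 == "H")) ||
          (!decide ((b.1 == "H") < (a.1 == "H")) && decide (a.2 < b.2))) x
        (PySem.List.sorted2 l (fun p => p.1 == "H") (fun p => p.2)) := by
  simp [PySem.List.sorted2, List.foldl_append]

-- dropping an element: filtering commutes with insertion when the element is dropped
theorem filter_insertBy_neg {α : Type} (bf : α → α → Bool) (p : α → Bool) (x : α) (A : List α)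
    (hx : p x = false) :
    (PySem.List.insertBy bf x A).filter p = A.filter p := by
  induction A with
  | nil => simp [PySem.List.insertBy, hx]
  | cons a A ih =>
    simp only [PySem.List.insertBy]
    split
    · simp [List.filter, hx]
    · cases hpa : p a <;> simp [List.filter, hpa, ih]

-- keeping an element: filtering commutes with insertion into a key-sorted list
theorem filter_insertBy_pos {α : Type} (key : α → Int) (p : α → Bool) (x : α) (A : List α)
    (hsort : A.Pairwise (fun a b => key a ≤ key b)) (hx : p x = true) :
    (PySem.List.insertBy (fun a b => decide (key a < key b)) x A).filter p =
      PySem.List.insertBy (fun a b => decide (key a < key b)) x (A.filter p) := by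
  induction A with
  | nil => simp [PySem.List.insertBy, hx]
  | cons a A ih =>
    rcases List.pairwise_cons.mp hsort with ⟨ha, hA⟩
    simp only [PySem.List.insertBy]
    by_cases hlt : key x < key a
    · simp only [decide_eq_true_eq, hlt, if_pos]
      cases hpa : p a
      · simp only [List.filter, hx, hpa]
        rw [insertBy_of_forall_before]
        intro y hy
        have : y ∈ A := List.mem_of_mem_filter hy
        simp [lt_of_lt_of_le hlt (ha y this)]
      · simp [List.filter, hx, hpa, PySem.List.insertBy, hlt]
    · simp only [decide_eq_true_eq, hlt, if_neg, not_false_eq_true]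
      cases hpa : p a
      · simp [List.filter, hpa, ih hA]
      · simp [List.filter, hpa, ih hA, PySem.List.insertBy, hlt]

-- a stable sort of a filtered list is the filtered stable sort
theorem sorted_filter {α : Type} (key : α → Int) (p : α → Bool) (xs : List α) :
    PySem.List.sorted (xs.filter p) key = (PySem.List.sorted xs key).filter p := by
  induction xs using List.reverseRecOn with
  | nil => rfl
  | append_singleton l x ih =>
    rw [List.filter_append, sorted_concat]
    cases hx : p x
    · simp only [List.filter, hx, List.append_nil, ih,
        filter_insertBy_neg _ p x _ hx]
    · simp only [List.filter, hx, sorted_concat, ih]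
      rw [filter_insertBy_pos key p x _ (PySem.List.sorted_pairwise l key) hx]

-- the composite-key stable sort splits into the non-H block followed by the H block
theorem sorted2_split (xs : List (String × Int)) :
    PySem.List.sorted2 xs (fun p => p.1 == "H") (fun p => p.2) =
      PySem.List.sorted (xs.filter (fun p => !(p.1 == "H"))) (fun p => p.2) ++
      PySem.List.sorted (xs.filter (fun p => p.1 == "H")) (fun p => p.2) := by
  induction xs using List.reverseRecOn with
  | nil => rfl
  | append_singleton l x ih =>
    rw [sorted2_concat, ih, List.filter_append, List.filter_append]
    cases hx : (x.1 == "H")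
    · simp only [List.filter, hx, Bool.not_false, List.append_nil]
      rw [insertBy_append_barrier]
      · rw [insertBy_congr (bf' := fun a b => decide (a.2 < b.2)), ← sorted_concat]
        intro y hy
        have : (y.1 == "H") = false := by
          have := (List.mem_filter.mp ((PySem.List.mem_sorted _ _ _ _).mp hy)).2
          simpa using this
        simp [hx, this]
      · intro y hy
        have : (y.1 == "H") = true := by
          have := (List.mem_filter.mp ((PySem.List.mem_sorted _ _ _ _).mp hy)).2
          simpa using this
        simp [hx, this]
    · simp only [List.filter, hx, Bool.not_true, List.append_nil]
      rw [insertBy_append_of_forall_not]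
      · rw [insertBy_congr (bf' := fun a b => decide (a.2 < b.2)), ← sorted_concat]
        intro y hy
        have : (y.1 == "H") = true := by
          have := (List.mem_filter.mp ((PySem.List.mem_sorted _ _ _ _).mp hy)).2
          simpa using this
        simp [hx, this]
      · intro y hy
        have : (y.1 == "H") = false := by
          have := (List.mem_filter.mp ((PySem.List.mem_sorted _ _ _ _).mp hy)).2
          simpa using this
        simp [hx, this]

-- rebuilding a dict from a list with pairwise-distinct keys keeps the list as items
theorem dict_foldl_insert_items (s acc : List (String × Int))
    (h : ((acc ++ s).map Prod.fst).Nodup) :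
    (s.foldl (fun (d : PySem.Dict String Int) kv => d.insert kv.1 kv.2)
      (PySem.Dict.mk acc)).items = acc ++ s := by
  induction s generalizing acc with
  | nil => simp
  | cons kv s ih =>
    have h' : (List.map Prod.fst acc ++ kv.1 :: List.map Prod.fst s).Nodup := by
      simpa using h
    have hni : kv.1 ∉ List.map Prod.fst acc :=
      fun hm => (List.nodup_append.mp h').2.2 kv.1 hm kv.1 (by simp) rfl
    have hnc : (PySem.Dict.mk acc).contains kv.1 = false := by
      simp only [PySem.Dict.contains, List.any_eq_false]
      intro p hp
      simp only [Bool.not_eq_true, beq_eq_false_iff_ne]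
      exact fun he => hni (he ▸ List.mem_map_of_mem hp)
    rw [List.foldl_cons]
    have hins : (PySem.Dict.mk acc).insert kv.1 kv.2 = PySem.Dict.mk (acc ++ [kv]) := by
      simp [PySem.Dict.insert, hnc]
    rw [hins, ih (acc ++ [kv]) (by simpa using h)]
    simp

-- ===== VERDICT (by name: the statement is the Claim_ definition above) =====
theorem sort_elements_spec : Claim_equal_sort_elements := by
  intro xs _ hpre
  unfold Spec_sort_elements sort_elements sort_elements_alt
  -- S : the items sorted by atomic number; ks : its keys
  set S := PySem.List.sorted xs (fun item => item.2) with hS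
  have hperm : S.Perm xs := PySem.List.sorted_perm xs _ false
  have hnodup : (S.map Prod.fst).Nodup := (hperm.map Prod.fst).nodup_iff.mpr hpre
  have hitems : ((S.foldl (fun (d : PySem.Dict String Int) kv => d.insert kv.1 kv.2)
      (PySem.Dict.mk [])).items) = S := by
    simpa using dict_foldl_insert_items S [] (by simpa using hnodup)
  -- B's side, rewritten as the two filtered blocks of S
  have hB : (PySem.List.sorted2 xs (fun p => p.1 == "H") (fun p => p.2)).map (fun kv => kv.1) =
      (S.map Prod.fst).filter (fun k => !(k == "H")) ++
      (S.map Prod.fst).filter (fun k => k == "H") := by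
    rw [sorted2_split, List.map_append, sorted_filter, sorted_filter, ← hS,
      List.filter_map, List.filter_map]
    rfl
  simp only [PySem.Dict.keys, hitems, hB]
  set ks := S.map Prod.fst with hks
  by_cases hmem : "H" ∈ ks
  · simp only [hmem, if_true]
    rw [PySem.List.remove?_eq_some_erase ks "H" hmem]
    simp only
    rw [List.Nodup.erase_eq_filter hnodup]
    have hone : ks.filter (fun k => k == "H") = ["H"] := by
      rw [List.filter_beq, List.count_eq_one_of_mem hnodup hmem, List.replicate_one]
    rw [hone]
    rfl
  · rw [if_neg hmem]
    have h1 : ks.filter (fun k => !(k == "H")) = ks :=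
      List.filter_eq_self.mpr (fun a ha => by
        simp only [Bool.not_eq_eq_eq_not, Bool.not_true, beq_eq_false_iff_ne]
        exact fun he => hmem (he ▸ ha))
    have h2 : ks.filter (fun k => k == "H") = [] :=
      List.filter_eq_nil_iff.mpr (fun a ha => by
        simp only [Bool.not_eq_true, beq_eq_false_iff_ne]
        exact fun he => hmem (he ▸ ha))
    rw [h1, h2, List.append_nil]
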